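-- pv_equiv track=rewrite | github.com/flohop/adventOfCode | 2023/day_five.py | helper
-- ===== SOURCE A (Python) =====
-- def helper(lines: list[str]) -> list:
--     """Given a section return the dict for it """
--     i = 1
--     res = {}
--     while i < len(lines):
--         if lines[i] == "\n":
--             i += 1
--             continue
--
--         # at start of a block
--         map_name = lines[i].split()[0]
--
--         values = []
--         # get a list of all values
--         i += 1
--         while i < len(lines) and lines[i] != "\n":
--             values.append([int(x) for x in lines[i].split()])
--             i += 1
--
--         res[map_name] = values
--
--     return res
-- ===== SOURCE B (Python) =====
-- def helper(lines: list[str]) -> list: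
--     """Given a section return the dict for it """
--     # Pass 1: group lines[1:] into blocks separated by "\n" lines.
--     blocks = []
--     cur = []
--     for line in lines[1:]:
--         if line == "\n":
--             if cur:
--                 blocks.append(cur)
--                 cur = []
--         else:
--             cur.append(line)
--     if cur:
--         blocks.append(cur)
--     # Pass 2: first token of a block's first line names it; remaining lines are int rows.
--     res = {}
--     for block in blocks:
--         res[block[0].split()[0]] = [[int(x) for x in l.split()] for l in block[1:]]
--     return res
-- ===== Notes on version B (the rewrite author's own statement) =====
-- stated objective: idiomatic
-- what changed: Replaces A's index-driven nested while loops with a two-pass decomposition: one linear pass groups lines[1:] into blank-separated blocks, then a comprehension-based pass turns each block into its name and parsed integer rows.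
import Mathlib
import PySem

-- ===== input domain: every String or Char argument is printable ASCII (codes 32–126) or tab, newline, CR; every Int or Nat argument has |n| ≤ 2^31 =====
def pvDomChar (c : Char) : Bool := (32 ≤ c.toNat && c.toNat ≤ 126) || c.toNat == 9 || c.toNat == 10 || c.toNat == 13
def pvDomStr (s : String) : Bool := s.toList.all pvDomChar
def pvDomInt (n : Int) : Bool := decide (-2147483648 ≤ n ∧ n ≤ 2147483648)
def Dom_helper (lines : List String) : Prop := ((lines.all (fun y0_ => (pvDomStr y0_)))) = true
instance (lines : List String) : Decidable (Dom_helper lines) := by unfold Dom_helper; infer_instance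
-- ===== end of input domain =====

-- B replaces A's index-driven nested while loops with a two-pass decomposition
-- (group lines[1:] into blank-separated blocks, then parse each block); idiomatic, same cost.


-- ===== PORT A =====
-- [int(x) for x in line.split()]  (the .getD 0 is unreachable inside Pre_helper, which demands int() succeed)
def pvParseRowA (l : String) : List Int :=
  (PySem.Str.split₀ l).map (fun x => (PySem.Int.ofStr? x).getD 0)

-- inner while: collect parsed value rows until a "\n" line (or end); returns rows and remaining lines
def pvTakeBlockA : List String → (List (List Int) × List String)
  | [] => ([], [])
  | l :: rest =>
    if l = "\n" then ([], l :: rest)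
    else
      let p := pvTakeBlockA rest
      (pvParseRowA l :: p.1, p.2)

theorem pvTakeBlockA_len_le : ∀ (ls : List String), (pvTakeBlockA ls).2.length ≤ ls.length := by
  intro ls
  induction ls with
  | nil => simp [pvTakeBlockA]
  | cons l rest ih =>
    simp only [pvTakeBlockA]
    split
    · simp
    · simpa using Nat.le_succ_of_le ih

-- outer while over the suffix of lines the index i points at
def pvHelperLoopA (ls : List String) (res : PySem.Dict String (List (List Int))) :
    PySem.Dict String (List (List Int)) :=
  match ls with
  | [] => res
  | l :: rest =>
    if l = "\n" then pvHelperLoopA rest res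
    else
      -- map_name = lines[i].split()[0]  (the .headD "" is unreachable inside Pre_helper)
      let name := (PySem.Str.split₀ l).headD ""
      let p := pvTakeBlockA rest
      pvHelperLoopA p.2 (res.insert name p.1)
termination_by ls.length
decreasing_by
  · simp
  · simp only [List.length_cons]
    exact Nat.lt_succ_of_le (pvTakeBlockA_len_le rest)

def helper (lines : List String) : List (String × List (List Int)) :=
  (pvHelperLoopA (lines.drop 1) PySem.Dict.empty).items

-- ===== PORT B =====
-- one grouping step of B's first pass (state: finished blocks, current block)
def pvGroupStepB (st : List (List String) × List String) (l : String) :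
    List (List String) × List String :=
  if l = "\n" then (if st.2 = [] then st else (st.1 ++ [st.2], []))
  else (st.1, st.2 ++ [l])

-- pass 1: blank-separated blocks of ls
def pvGroupsB (ls : List String) : List (List String) :=
  let st := ls.foldl pvGroupStepB ([], [])
  if st.2 = [] then st.1 else st.1 ++ [st.2]

-- [int(x) for x in l.split()]
def pvParseRowB (l : String) : List Int :=
  (PySem.Str.split₀ l).map (fun x => (PySem.Int.ofStr? x).getD 0)

-- pass 2: res[block[0].split()[0]] = parsed rows of block[1:]
def helper_alt (lines : List String) : List (String × List (List Int)) :=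
  ((pvGroupsB (lines.drop 1)).foldl
    (fun d b => d.insert ((PySem.Str.split₀ (b.headD "")).headD "") ((b.drop 1).map pvParseRowB))
    PySem.Dict.empty).items

-- ===== PRECONDITION & SPEC =====
-- Pre_ excludes exactly the inputs on which Python A raises: a block-start line (a non-"\n" line at
-- index 1 or right after a "\n") whose split() is empty (IndexError), or a value line with a token
-- int() rejects (ValueError).
def Pre_helper (lines : List String) : Prop :=
  ∀ i ∈ List.range lines.length, 1 ≤ i → lines.getD i "" ≠ "\n" →
    if i = 1 ∨ lines.getD (i - 1) "" = "\n"
    then PySem.Str.split₀ (lines.getD i "") ≠ []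
    else ∀ t ∈ PySem.Str.split₀ (lines.getD i ""), (PySem.Int.ofStr? t).isSome
instance (lines : List String) : Decidable (Pre_helper lines) := by unfold Pre_helper; infer_instance

def pvWitness_helper : List String :=
  ["seeds: 79 14\n", "seed-to-soil map:\n", "50 98 2\n", "52 50 48\n", "\n", "soil map:\n", "0 15 37\n"]

def Spec_helper (lines : List String) (out : List (String × List (List Int))) : Prop := out = helper_alt lines
instance (lines : List String) (out : List (String × List (List Int))) : Decidable (Spec_helper lines out) := by unfold Spec_helper; infer_instance

-- ===== CLAIM (what is proved, stated in full; the proofs are below) =====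
def Claim_equal_helper : Prop := ∀ (lines : List String), Dom_helper lines → Pre_helper lines → Spec_helper lines (helper lines)

-- ===== LEMMAS AND PROOFS =====

-- finish B's grouping state (what pvGroupsB does after its foldl)
def pvFinishB (st : List (List String) × List String) : List (List String) :=
  if st.2 = [] then st.1 else st.1 ++ [st.2]

theorem pvGroupsB_eq_finish (ls : List String) :
    pvGroupsB ls = pvFinishB (ls.foldl pvGroupStepB ([], [])) := rfl

theorem pvGroupsB_newline (rest : List String) : pvGroupsB ("\n" :: rest) = pvGroupsB rest := by
  rw [pvGroupsB_eq_finish, pvGroupsB_eq_finish]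
  simp [pvGroupStepB]

-- the two grouping invariants, proved together by strong induction on length
theorem pvGroupB_invariants : ∀ (n : ℕ) (ls : List String), ls.length ≤ n →
    (∀ bs, pvFinishB (ls.foldl pvGroupStepB (bs, [])) = bs ++ pvGroupsB ls) ∧
    (∀ bs cur, cur ≠ [] →
      pvFinishB (ls.foldl pvGroupStepB (bs, cur)) =
        bs ++ (cur ++ ls.takeWhile (· ≠ "\n")) :: pvGroupsB (ls.dropWhile (· ≠ "\n"))) := by
  intro n
  induction n with
  | zero =>
    intro ls hl
    have : ls = [] := List.eq_nil_of_length_eq_zero (Nat.le_zero.mp hl)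
    subst this
    constructor
    · intro bs; simp [pvFinishB, pvGroupsB]
    · intro bs cur hc; simp [pvFinishB, pvGroupsB, hc]
  | succ n ih =>
    intro ls hl
    match ls with
    | [] =>
      constructor
      · intro bs; simp [pvFinishB, pvGroupsB]
      · intro bs cur hc; simp [pvFinishB, pvGroupsB, hc]
    | l :: rest =>
      have hr : rest.length ≤ n := by simpa using Nat.succ_le_succ_iff.mp hl
      have hgcons : l ≠ "\n" → pvGroupsB (l :: rest) =
          (l :: rest.takeWhile (· ≠ "\n")) :: pvGroupsB (rest.dropWhile (· ≠ "\n")) := by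
        intro h
        rw [pvGroupsB_eq_finish, List.foldl_cons,
          show pvGroupStepB ([], []) l = ([], [l]) from by simp [pvGroupStepB, h]]
        simpa using (ih rest hr).2 ([] : List (List String)) [l] (by simp)
      constructor
      · intro bs
        by_cases h : l = "\n"
        · subst h
          rw [List.foldl_cons, show pvGroupStepB (bs, []) "\n" = (bs, []) from by simp [pvGroupStepB],
            (ih rest hr).1 bs, pvGroupsB_newline]
        · rw [List.foldl_cons, show pvGroupStepB (bs, []) l = (bs, [l]) from by simp [pvGroupStepB, h],
            (ih rest hr).2 bs [l] (by simp), hgcons h]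
          simp
      · intro bs cur hc
        by_cases h : l = "\n"
        · subst h
          rw [List.foldl_cons,
            show pvGroupStepB (bs, cur) "\n" = (bs ++ [cur], []) from by simp [pvGroupStepB, hc],
            (ih rest hr).1 (bs ++ [cur])]
          have ht : List.takeWhile (fun x => decide (x ≠ "\n")) ("\n" :: rest) = [] := by
            simp [List.takeWhile]
          have hd : List.dropWhile (fun x => decide (x ≠ "\n")) ("\n" :: rest) = "\n" :: rest := by
            simp [List.dropWhile]
          simp [pvGroupsB_newline]
        · rw [List.foldl_cons,
            show pvGroupStepB (bs, cur) l = (bs, cur ++ [l]) from by simp [pvGroupStepB, h],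
            (ih rest hr).2 bs (cur ++ [l]) (by simp)]
          simp [h]

-- pvGroupsB peels the first block off a non-"\n" head
theorem pvGroupsB_cons (l : String) (rest : List String) (h : l ≠ "\n") :
    pvGroupsB (l :: rest) =
      (l :: rest.takeWhile (· ≠ "\n")) :: pvGroupsB (rest.dropWhile (· ≠ "\n")) := by
  rw [pvGroupsB_eq_finish]
  simp only [List.foldl_cons, pvGroupStepB, if_neg h]
  have h3 := (pvGroupB_invariants rest.length rest le_rfl).2 ([] : List (List String)) [l] (by simp)
  simpa using h3

-- A's inner while is takeWhile/dropWhile at the first "\n"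
theorem pvTakeBlockA_eq (ls : List String) :
    pvTakeBlockA ls = ((ls.takeWhile (· ≠ "\n")).map pvParseRowA, ls.dropWhile (· ≠ "\n")) := by
  induction ls with
  | nil => simp [pvTakeBlockA]
  | cons l rest ih =>
    by_cases h : l = "\n"
    · subst h; simp [pvTakeBlockA, List.takeWhile, List.dropWhile]
    · simp [pvTakeBlockA, h, ih, List.takeWhile, List.dropWhile]

-- main loop correspondence: A's outer while = B's fold over the blocks
theorem pvLoop_eq : ∀ (n : ℕ) (ls : List String), ls.length ≤ n →
    ∀ (res : PySem.Dict String (List (List Int))),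
    pvHelperLoopA ls res =
      (pvGroupsB ls).foldl
        (fun d b => d.insert ((PySem.Str.split₀ (b.headD "")).headD "") ((b.drop 1).map pvParseRowB))
        res := by
  intro n
  induction n with
  | zero =>
    intro ls hl res
    have : ls = [] := List.eq_nil_of_length_eq_zero (Nat.le_zero.mp hl)
    subst this
    simp [pvHelperLoopA, pvGroupsB]
  | succ n ih =>
    intro ls hl res
    match ls with
    | [] => simp [pvHelperLoopA, pvGroupsB]
    | l :: rest =>
      have hr : rest.length ≤ n := by simpa using Nat.succ_le_succ_iff.mp hl
      by_cases h : l = "\n"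
      · subst h
        rw [show pvHelperLoopA ("\n" :: rest) res = pvHelperLoopA rest res from by
          simp [pvHelperLoopA]]
        rw [pvGroupsB_newline]
        exact ih rest hr res
      · rw [show pvHelperLoopA (l :: rest) res =
            pvHelperLoopA (pvTakeBlockA rest).2
              (res.insert ((PySem.Str.split₀ l).headD "") (pvTakeBlockA rest).1) from by
          rw [pvHelperLoopA]; simp [h]]
        rw [pvGroupsB_cons l rest h]
        simp only [List.foldl_cons]
        rw [pvTakeBlockA_eq]
        have hdlen : (rest.dropWhile (· ≠ "\n")).length ≤ n :=
          le_trans (List.length_dropWhile_le _ _) hr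
        rw [ih (rest.dropWhile (· ≠ "\n")) hdlen]
        rfl

-- ===== VERDICT (by name: the statement is the Claim_ definition above) =====
theorem helper_spec : Claim_equal_helper := by
  intro lines _ _
  unfold Spec_helper helper helper_alt
  rw [pvLoop_eq (lines.drop 1).length (lines.drop 1) le_rfl]
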